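-- pv_equiv track=rewrite | github.com/SCLemon/CPE_package | 必考 49 題/必考 49 題 Python 參考答案一/10190.py | solve
-- ===== SOURCE A (Python) =====
-- def solve(m, n):
--     if m == 0 or n == 0 or m == 1 or n == 1: return 'Boring!'
--     ans = [m]
--     while m > 1:
--         if m % n != 0: return 'Boring!'
--         ans.append(m // n)
--         m //= n
--     return ' '.join([str(i) for i in ans])
-- ===== SOURCE B (Python) =====
-- def solve(m, n):
--     # a valid chain m, m/n, ..., 1 needs m >= 2 and |n| >= 2
--     if m < 2 or abs(n) < 2:
--         return 'Boring!'
--     # climb the powers of n and test a single final equality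
--     val, powers = 1, [1]
--     while val < m:
--         val *= n
--         powers.append(val)
--     if val != m:
--         return 'Boring!'
--     return ' '.join(str(x) for x in reversed(powers))
-- ===== Notes on version B (the rewrite author's own statement) =====
-- stated objective: alternative
-- what changed: B replaces A's divide-down loop with per-step modulo checks by climbing the powers of n upward (val *= n) and testing a single final equality val == m, reversing the collected powers for output.
-- intended difference: On inputs with m < 0, or with a negative n dividing m (A's trivial guard not firing), A's loop condition m > 1 stops before the chain reaches 1 and A returns a truncated chain such as '-5' for (-5, 2); B returns 'Boring!' (or the full chain ending in 1 when m is an exact power of n), the intended verdict since the division chain must end at 1. — e.g. on solve(-5, 2): A returns "-5", B returns "Boring!"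
import Mathlib
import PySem

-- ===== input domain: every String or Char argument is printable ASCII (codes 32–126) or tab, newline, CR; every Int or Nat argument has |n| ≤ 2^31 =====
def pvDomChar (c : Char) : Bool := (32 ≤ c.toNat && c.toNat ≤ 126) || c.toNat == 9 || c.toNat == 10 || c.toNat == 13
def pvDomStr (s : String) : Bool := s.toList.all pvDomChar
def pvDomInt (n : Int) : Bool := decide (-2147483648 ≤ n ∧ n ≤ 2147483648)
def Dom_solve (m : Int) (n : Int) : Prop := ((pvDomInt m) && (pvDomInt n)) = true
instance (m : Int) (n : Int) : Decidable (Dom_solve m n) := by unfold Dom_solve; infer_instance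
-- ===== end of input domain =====

-- B rebuilds the chain by multiplying powers of n upward with one final equality test
-- instead of A's divide-down loop with per-step modulo checks (objective: alternative).

-- ===== PORT A =====
-- the while loop of A; fuel only makes the recursion total (m.toNat + 1 always suffices),
-- the 0 case is never reached on the inputs A terminates on
def pvLoopA (fuel : Nat) (n : Int) (m : Int) (ans : List Int) : String :=
  match fuel with
  | 0 => "Boring!"
  | fuel + 1 =>
    if 1 < m then
      if PySem.Int.mod m n ≠ 0 then "Boring!"
      else pvLoopA fuel n (PySem.Int.floordiv m n) (ans ++ [PySem.Int.floordiv m n])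
    else PySem.Str.join " " (ans.map PySem.Int.toStr)

def solve (m : Int) (n : Int) : String :=
  if m = 0 ∨ n = 0 ∨ m = 1 ∨ n = 1 then "Boring!"
  else pvLoopA (m.toNat + 1) n m [m]

-- ===== PORT B =====
-- the while loop of B; again fuel m.toNat + 1 is always enough
def pvLoopB (fuel : Nat) (m : Int) (n : Int) (val : Int) (powers : List Int) : String :=
  match fuel with
  | 0 => "Boring!"
  | fuel + 1 =>
    if val < m then pvLoopB fuel m n (val * n) (powers ++ [val * n])
    else if val ≠ m then "Boring!"
    else PySem.Str.join " " (powers.reverse.map PySem.Int.toStr)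

def solve_alt (m : Int) (n : Int) : String :=
  if m < 2 ∨ |n| < 2 then "Boring!"
  else pvLoopB (m.toNat + 1) m n 1 [1]

-- ===== PRECONDITION & SPEC =====
-- On inputs with m < 0, or with a negative n dividing m (A's trivial guard not firing),
-- A's loop condition m > 1 stops before the chain reaches 1 and A returns a truncated
-- chain such as "-5" for (-5, 2); B returns "Boring!" (or the full
-- chain ending in 1 when m is an exact power of n), the intended verdict since the
-- division chain must end at 1.
def D_solve (m : Int) (n : Int) : Prop :=
  ¬(m = 0 ∨ n = 0 ∨ m = 1 ∨ n = 1) ∧ (m < 0 ∨ (n < 0 ∧ n ∣ m))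
instance (m : Int) (n : Int) : Decidable (D_solve m n) := by unfold D_solve; infer_instance

def Spec_solve (m : Int) (n : Int) (out : String) : Prop := ¬ D_solve m n → out = solve_alt m n
instance (m : Int) (n : Int) (out : String) : Decidable (Spec_solve m n out) := by unfold Spec_solve; infer_instance

def pvDiffWitness_solve : Int × Int := (-5, 2)
def pvDiffWitnessOut_solve : String × String := ("-5", "Boring!")

-- ===== CLAIM (what is proved, stated in full; the proofs are below) =====
def Claim_unchanged_solve : Prop := ∀ (m : Int) (n : Int), Dom_solve m n → Spec_solve m n (solve m n)
def Claim_changed_solve : Prop := Dom_solve (pvDiffWitness_solve.1) (pvDiffWitness_solve.2) ∧ D_solve (pvDiffWitness_solve.1) (pvDiffWitness_solve.2) ∧ solve (pvDiffWitness_solve.1) (pvDiffWitness_solve.2) = pvDiffWitnessOut_solve.1 ∧ solve_alt (pvDiffWitness_solve.1) (pvDiffWitness_solve.2) = pvDiffWitnessOut_solve.2 ∧ pvDiffWitnessOut_solve.1 ≠ pvDiffWitnessOut_solve.2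

-- ===== LEMMAS AND PROOFS =====

lemma pv_pow_pos {n : Int} (hn : 2 ≤ n) (k : Nat) : 0 < n ^ k :=
  pow_pos (by omega) k

lemma pv_pow_lt_pow {n : Int} (hn : 2 ≤ n) {i j : Nat} (h : i < j) : n ^ i < n ^ j := by
  exact pow_lt_pow_right₀ (by omega) h

lemma pv_k_lt_pow {n : Int} (hn : 2 ≤ n) (k : Nat) : (k : Int) < n ^ k := by
  induction k with
  | zero => simp
  | succ k ih =>
    have h1 : 0 < n ^ k := pv_pow_pos hn k
    have : n ^ (k + 1) = n ^ k * n := by ring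
    push_cast
    nlinarith

-- A's loop on an exact power n^k appends the descending tail of powers
lemma pv_la_pow {n : Int} (hn : 2 ≤ n) :
    ∀ (k fuel : Nat) (acc : List Int), (n ^ k).toNat < fuel →
      pvLoopA fuel n (n ^ k) acc =
        PySem.Str.join " " ((acc ++ (List.range k).reverse.map (fun i => n ^ i)).map PySem.Int.toStr) := by
  intro k
  induction k with
  | zero =>
    intro fuel acc hf
    match fuel, hf with
    | fuel + 1, _ => simp [pvLoopA]
  | succ k ih =>
    intro fuel acc hf
    have hpos : 0 < n ^ k := pv_pow_pos hn k
    have hm : 1 < n ^ (k + 1) := by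
      have := pv_pow_lt_pow hn (Nat.zero_lt_succ k)
      simpa using lt_of_le_of_lt (by simpa using hpos) this
    match fuel, hf with
    | fuel + 1, hf =>
      have hdvd : n ∣ n ^ (k + 1) := dvd_pow_self n (Nat.succ_ne_zero k)
      have hmod : PySem.Int.mod (n ^ (k + 1)) n = 0 :=
        (PySem.Int.mod_eq_zero_iff_dvd _ _).mpr hdvd
      have hdiv : PySem.Int.floordiv (n ^ (k + 1)) n = n ^ k := by
        rw [PySem.Int.floordiv_eq_ediv_of_pos (by omega)]
        rw [pow_succ]
        exact Int.mul_ediv_cancel _ (by omega)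
      have hlt : (n ^ k).toNat < fuel := by
        have h1 : n ^ k < n ^ (k + 1) := pv_pow_lt_pow hn (Nat.lt_succ_self k)
        omega
      rw [pvLoopA]
      simp only [hm, if_pos, hmod, hdiv, ne_eq, not_true_eq_false, if_false, if_neg, not_not]
      rw [ih fuel (acc ++ [n ^ k]) hlt]
      congr 1
      rw [List.range_succ, List.reverse_append]
      simp

-- A's loop returns 'Boring!' when m ≥ 1 is not a power of n ≥ 2
lemma pv_la_nonpow {n : Int} (hn : 2 ≤ n) :
    ∀ (fuel : Nat) (m : Int) (acc : List Int), 1 ≤ m → m.toNat < fuel →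
      (∀ k : Nat, m ≠ n ^ k) → pvLoopA fuel n m acc = "Boring!" := by
  intro fuel
  induction fuel with
  | zero => intro m acc h1 hf _; omega
  | succ fuel ih =>
    intro m acc h1 hf hnp
    have hm : 1 < m := by
      rcases lt_or_eq_of_le h1 with h | h
      · exact h
      · exact absurd h.symm (by simpa using hnp 0)
    rw [pvLoopA]
    simp only [hm, if_pos]
    by_cases hmod : PySem.Int.mod m n = 0
    · simp only [hmod, ne_eq, not_true_eq_false, if_false, if_neg, not_not]
      set q := PySem.Int.floordiv m n with hq
      have hqn : q * n + 0 = m := by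
        rw [hq, ← hmod]; exact PySem.Int.floordiv_mul_add_mod m n
      have hq1 : 1 ≤ q := by nlinarith
      have hqm : q < m := by nlinarith
      apply ih q _ hq1 (by omega)
      intro k hk
      exact hnp (k + 1) (by rw [pow_succ]; nlinarith [hk])
    · simp [hmod]

-- B's loop, climbing from n^i inside an exact power n^K (n ≥ 2), reaches m
lemma pv_lb_pow {n : Int} (hn : 2 ≤ n) (K : Nat) :
    ∀ (fuel i : Nat), i ≤ K → K - i < fuel →
      pvLoopB fuel (n ^ K) n (n ^ i) ((List.range (i + 1)).map (fun j => n ^ j)) =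
        PySem.Str.join " " ((((List.range (K + 1)).map (fun j => n ^ j)).reverse).map PySem.Int.toStr) := by
  intro fuel
  induction fuel with
  | zero => intro i _ hf; omega
  | succ fuel ih =>
    intro i hiK hf
    rcases lt_or_eq_of_le hiK with hi | hi
    · have hlt : n ^ i < n ^ K := pv_pow_lt_pow hn hi
      rw [pvLoopB]
      simp only [hlt, if_pos]
      have hmul : n ^ i * n = n ^ (i + 1) := (pow_succ n i).symm
      have hlist : (List.range (i + 1)).map (fun j => n ^ j) ++ [n ^ (i + 1)] =
          (List.range (i + 1 + 1)).map (fun j => n ^ j) := by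
        rw [List.range_succ (n := i + 1)]
        simp
      rw [hmul, hlist]
      exact ih (i + 1) hi (by omega)
    · subst hi
      rw [pvLoopB]
      simp

-- B's loop returns 'Boring!' when m is not a power of n (any n): each value it
-- holds is a power of n, so the final equality test can never succeed
lemma pv_lb_nonpow {n m : Int} (hnp : ∀ k : Nat, m ≠ n ^ k) :
    ∀ (fuel i : Nat) (powers : List Int),
      pvLoopB fuel m n (n ^ i) powers = "Boring!" := by
  intro fuel
  induction fuel with
  | zero => intro i powers; rfl
  | succ fuel ih =>
    intro i powers
    rw [pvLoopB]
    by_cases hlt : n ^ i < m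
    · simp only [hlt, if_pos]
      have hmul : n ^ i * n = n ^ (i + 1) := (pow_succ n i).symm
      rw [hmul]
      exact ih (i + 1) _
    · have hne : n ^ i ≠ m := fun h => hnp i h.symm
      simp [hlt, hne, Ne.symm hne]

-- the main case split
lemma pv_main (m n : Int) (hD : ¬ D_solve m n) : solve m n = solve_alt m n := by
  unfold solve solve_alt
  unfold D_solve at hD
  by_cases hg : m = 0 ∨ n = 0 ∨ m = 1 ∨ n = 1
  · have hg' : m < 2 ∨ |n| < 2 := by
      rcases hg with h | h | h | h <;> subst h <;> simp <;> omega
    rw [if_pos hg, if_pos hg']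
  · have hside : ¬(m < 0 ∨ (n < 0 ∧ n ∣ m)) := fun h => hD ⟨hg, h⟩
    have hgc := hg
    push_neg at hgc
    push_neg at hside
    obtain ⟨hm0, hn0, hm1, hn1⟩ := hgc
    have hm2 : 2 ≤ m := by
      have := hside.1
      omega
    rw [if_neg hg]
    by_cases hnneg : n < 0
    · -- n ≤ -2 and n does not divide m (else D_ would hold)
      have hndvd : ¬ n ∣ m := hside.2 hnneg
      have hn2 : n ≤ -2 := by
        by_contra hc
        have hn1' : n = -1 := by omega
        exact hndvd (hn1' ▸ ⟨-m, by ring⟩)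
      have hguard : ¬ (m < 2 ∨ |n| < 2) := by
        rw [abs_of_neg hnneg]; omega
      rw [if_neg hguard]
      rw [pvLoopA]
      have hm1' : 1 < m := by omega
      have hmod : PySem.Int.mod m n ≠ 0 := by
        rw [ne_eq, PySem.Int.mod_eq_zero_iff_dvd]; exact hndvd
      simp only [hm1', if_pos, hmod, ne_eq, not_false_eq_true, if_pos]
      have hnp : ∀ k : Nat, m ≠ n ^ k := by
        intro k hk
        match k with
        | 0 => simp at hk; omega
        | k + 1 => exact hndvd (hk ▸ dvd_pow_self n (Nat.succ_ne_zero k))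
      have hb := pv_lb_nonpow hnp (m.toNat + 1) 0 [1]
      simp only [pow_zero] at hb
      rw [hb]
    · have hn2 : 2 ≤ n := by omega
      have hguard : ¬ (m < 2 ∨ |n| < 2) := by
        rw [abs_of_nonneg (by omega)]; omega
      rw [if_neg hguard]
      by_cases hp : ∃ k : Nat, m = n ^ k
      · obtain ⟨k, rfl⟩ := hp
        have hfa : (n ^ k).toNat < (n ^ k).toNat + 1 := Nat.lt_succ_self _
        rw [pv_la_pow hn2 k _ [n ^ k] hfa]
        have hkle : k - 0 < (n ^ k).toNat + 1 := by
          have := pv_k_lt_pow hn2 k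
          omega
        have hb := pv_lb_pow hn2 k ((n ^ k).toNat + 1) 0 (Nat.zero_le k) hkle
        simp only [Nat.zero_add, List.range_one, List.map_cons, List.map_nil, pow_zero] at hb
        rw [hb]
        congr 1
        rw [List.range_succ]
        simp [List.map_reverse]
      · push_neg at hp
        rw [pv_la_nonpow hn2 _ m [m] (by omega) (Nat.lt_succ_self _) hp]
        have hb := pv_lb_nonpow hp (m.toNat + 1) 0 [1]
        simp only [pow_zero] at hb
        rw [hb]

-- ===== VERDICT (by name: the statements are the Claim_ definitions above) =====
theorem solve_spec : Claim_unchanged_solve := by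
  intro m n _ hD
  exact pv_main m n hD

theorem solve_changed : Claim_changed_solve := by
  unfold Claim_changed_solve; decide
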